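-- pv_equiv track=rewrite | github.com/quadsteriv-cyber/stjohnstoneanalysis | multipositionalradar_upgraded_v2.py | _split_style_output_metrics
-- ===== SOURCE A (Python) =====
-- def _split_style_output_metrics(metrics):
--     """Heuristic split of metrics into 'style' vs 'output' for blending similarity.
--     Keeps backward compatibility with existing archetype configs.
--     """
--     # Output-ish metrics are high-variance, heavily team-context dependent, or direct production.
--     output_markers = {
--         'npg_90','goals_90','assists_90','xa_90','xg_90','npxg_90','np_xg_90','npxgxa_90','xgchain_90',
--         'op_xgchain_90','xgbuildup_90','op_xgbuildup_90','shots_90','shots_on_target_90','box_shots_90',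
--         'touches_inside_box_90','xg_per_shot','npxg_per_shot','key_passes_90'
--     }
--     output = [m for m in metrics if m in output_markers or 'xg' in m or 'xa' in m]
--     style = [m for m in metrics if m not in output]
--     # If heuristic fails (all went one side), fall back to original list
--     if not style:
--         style = metrics[:]
--     if not output:
--         output = []
--     return style, output
-- ===== SOURCE B (Python) =====
-- _OUTPUT_MARKERS = {
--     'npg_90','goals_90','assists_90','xa_90','xg_90','npxg_90','np_xg_90','npxgxa_90','xgchain_90',
--     'op_xgchain_90','xgbuildup_90','op_xgbuildup_90','shots_90','shots_on_target_90','box_shots_90',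
--     'touches_inside_box_90','xg_per_shot','npxg_per_shot','key_passes_90'
-- }
--
-- def _split_style_output_metrics(metrics):
--     """Single pass: classify each metric once instead of rescanning the output list."""
--     style, output = [], []
--     for m in metrics:
--         if m in _OUTPUT_MARKERS or 'xg' in m or 'xa' in m:
--             output.append(m)
--         else:
--             style.append(m)
--     if not style:
--         style = metrics[:]
--     return style, output
-- ===== Notes on version B (the rewrite author's own statement) =====
-- stated objective: simpler
-- what changed: Replaces A's two comprehensions (the second rescanning the built output list with 'm not in output') by one pass that classifies each metric once and appends it to style or output, keeping the same fallback and order.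
import Mathlib
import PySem

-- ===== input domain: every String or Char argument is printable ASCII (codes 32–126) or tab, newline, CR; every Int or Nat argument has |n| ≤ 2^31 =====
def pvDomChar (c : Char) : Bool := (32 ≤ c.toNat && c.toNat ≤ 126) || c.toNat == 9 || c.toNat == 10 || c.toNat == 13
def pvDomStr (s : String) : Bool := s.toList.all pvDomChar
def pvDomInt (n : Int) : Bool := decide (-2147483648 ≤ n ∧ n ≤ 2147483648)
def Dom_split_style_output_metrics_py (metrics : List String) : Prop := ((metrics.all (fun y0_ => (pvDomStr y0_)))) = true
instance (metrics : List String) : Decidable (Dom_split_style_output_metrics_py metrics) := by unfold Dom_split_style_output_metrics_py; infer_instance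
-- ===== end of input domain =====

-- ===== PORT A =====
def pvMarkers : PySem.Set String := PySem.Set.ofList
  ["npg_90","goals_90","assists_90","xa_90","xg_90","npxg_90","np_xg_90","npxgxa_90","xgchain_90",
   "op_xgchain_90","xgbuildup_90","op_xgbuildup_90","shots_90","shots_on_target_90","box_shots_90",
   "touches_inside_box_90","xg_per_shot","npxg_per_shot","key_passes_90"]

-- m in output_markers or 'xg' in m or 'xa' in m
def pvIsOutput (m : String) : Bool :=
  PySem.Set.contains pvMarkers m || PySem.Str.isIn "xg" m || PySem.Str.isIn "xa" m

-- A: build output, then rebuild style by membership scan of the output LIST, then fallbacks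
def split_style_output_metrics_py (metrics : List String) : List String × List String :=
  let output := metrics.filter (fun m => pvIsOutput m)
  let style := metrics.filter (fun m => !(output.contains m))
  let style := if style.isEmpty then metrics else style
  let output := if output.isEmpty then [] else output
  (style, output)

-- ===== PORT B =====
-- B: one pass, each metric classified once and appended to style or output
def split_style_output_metrics_py_alt (metrics : List String) : List String × List String :=
  let p := metrics.foldl
    (fun (acc : List String × List String) m =>
      if pvIsOutput m then (acc.1, acc.2 ++ [m]) else (acc.1 ++ [m], acc.2))
    ([], [])
  if p.1.isEmpty then (metrics, p.2) else (p.1, p.2)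

-- ===== PRECONDITION & SPEC =====
def Spec_split_style_output_metrics_py (metrics : List String) (out : List String × List String) : Prop := out = split_style_output_metrics_py_alt metrics
instance (metrics : List String) (out : List String × List String) : Decidable (Spec_split_style_output_metrics_py metrics out) := by unfold Spec_split_style_output_metrics_py; infer_instance

-- ===== CLAIM (what is proved, stated in full; the proofs are below) =====
def Claim_equal_split_style_output_metrics_py : Prop := ∀ (metrics : List String), Dom_split_style_output_metrics_py metrics → Spec_split_style_output_metrics_py metrics (split_style_output_metrics_py metrics)

-- ===== LEMMAS AND PROOFS =====
lemma pv_foldl_split (l : List String) (s o : List String) :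
    l.foldl (fun (acc : List String × List String) m =>
      if pvIsOutput m then (acc.1, acc.2 ++ [m]) else (acc.1 ++ [m], acc.2)) (s, o)
    = (s ++ l.filter (fun m => !pvIsOutput m), o ++ l.filter (fun m => pvIsOutput m)) := by
  induction l generalizing s o with
  | nil => simp
  | cons h t ih =>
    by_cases hp : pvIsOutput h = true <;>
      simp [List.foldl_cons, List.filter_cons, hp, ih]

lemma pv_style_eq (metrics : List String) :
    metrics.filter (fun m => !((metrics.filter (fun x => pvIsOutput x)).contains m))
    = metrics.filter (fun m => !pvIsOutput m) := by
  apply List.filter_congr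
  intro m hm
  by_cases hp : pvIsOutput m = true <;>
    simp [List.contains_eq_mem, List.mem_filter, hm, hp]


-- ===== VERDICT (by name: the statement is the Claim_ definition above) =====
theorem split_style_output_metrics_py_spec : Claim_equal_split_style_output_metrics_py := by
  intro metrics _
  unfold Spec_split_style_output_metrics_py split_style_output_metrics_py split_style_output_metrics_py_alt
  rw [pv_foldl_split]
  simp only [List.nil_append, pv_style_eq]
  by_cases hs : (metrics.filter (fun m => !pvIsOutput m)).isEmpty <;>
    by_cases ho : (metrics.filter (fun m => pvIsOutput m)).isEmpty <;>
    simp_all [List.isEmpty_iff] <;>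
    split_ifs <;> simp_all [List.filter_eq_nil_iff]
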